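-- pv_equiv track=rewrite | github.com/shrivarshapoojari/VigilNet | Network-Analyzer/Network-Scanner/analyzer/log_parser.py | detect_dos_attempts
-- ===== SOURCE A (Python) =====
-- from collections import Counter, defaultdict
--
-- def detect_dos_attempts(entries):
--     """Detect DoS attack attempts"""
--     ip_counts = defaultdict(int)
--
--     for entry in entries:
--         ip = entry.get('ip')
--         if ip:
--             ip_counts[ip] += 1
--
--     # Consider it DoS if an IP makes more than 100 requests
--     dos_attempts = 0
--     for ip, count in ip_counts.items():
--         if count > 100:
--             dos_attempts += 1
--
--     return dos_attempts
-- ===== SOURCE B (Python) =====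
-- def detect_dos_attempts(entries):
--     """Detect DoS attack attempts (no count table: repeatedly peel off one IP's
--     occurrences from the ip list, testing each distinct IP with list.count)."""
--     ips = [e.get('ip') for e in entries if e.get('ip')]
--     dos_attempts = 0
--     while ips:
--         ip = ips[0]
--         if ips.count(ip) > 100:
--             dos_attempts += 1
--         ips = [y for y in ips if y != ip]
--     return dos_attempts
-- ===== Notes on version B (the rewrite author's own statement) =====
-- stated objective: alternative
-- what changed: A tallies requests per IP in a dict and then scans the count table for counts above 100; B keeps no count table: it extracts the ip list and repeatedly takes the first ip, tests it with list.count(ip) > 100, and filters all its occurrences out, once per distinct IP.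
import Mathlib
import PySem

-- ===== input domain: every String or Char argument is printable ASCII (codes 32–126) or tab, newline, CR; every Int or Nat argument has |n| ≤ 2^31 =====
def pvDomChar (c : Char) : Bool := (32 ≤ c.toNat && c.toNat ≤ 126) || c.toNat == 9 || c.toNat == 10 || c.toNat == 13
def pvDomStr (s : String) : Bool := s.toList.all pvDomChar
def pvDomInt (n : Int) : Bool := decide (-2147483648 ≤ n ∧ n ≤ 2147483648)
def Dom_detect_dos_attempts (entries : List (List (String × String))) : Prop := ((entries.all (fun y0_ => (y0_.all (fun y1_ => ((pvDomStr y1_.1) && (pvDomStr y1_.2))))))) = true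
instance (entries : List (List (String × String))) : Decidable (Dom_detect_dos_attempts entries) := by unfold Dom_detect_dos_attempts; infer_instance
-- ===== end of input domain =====

-- B replaces A's count-dict + scan by repeated distinct-value elimination on the ip list
-- (take first ip, test list.count > 100, filter it out); objective: alternative algorithm.


-- ===== PORT A =====
def detect_dos_attempts (entries : List (List (String × String))) : Int :=
  -- ip_counts: first pass builds the per-ip count dict
  ((entries.foldl (fun d entry =>
      -- ip = entry.get('ip'); if ip: ip_counts[ip] += 1
      ((PySem.Dict.ofList entry).get? "ip").elim d
        (fun ip => if ip ≠ "" then d.modify ip 0 (· + 1) else d))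
      (PySem.Dict.empty : PySem.Dict String Int)
  -- second pass scans the count table
  ).items.foldl (fun dos p => if p.2 > 100 then dos + 1 else dos) 0)

-- ===== PORT B =====
/-- B's while loop: peel off the first ip's occurrences, once per distinct ip. -/
def pvGo : List String → Int
  | [] => 0
  | x :: t =>
      -- ip = ips[0]; if ips.count(ip) > 100: dos += 1; ips = [y for y in ips if y != ip]
      (if (x :: t).count x > 100 then (1 : Int) else 0)
        + pvGo ((x :: t).filter (fun y => y ≠ x))
termination_by l => l.length
decreasing_by
  simp only [List.filter_cons, decide_eq_true_eq]
  simp only [ne_eq, not_true_eq_false, decide_false]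
  exact Nat.lt_succ_of_le (List.length_filter_le _ t)

def detect_dos_attempts_alt (entries : List (List (String × String))) : Int :=
  -- ips = [e.get('ip') for e in entries if e.get('ip')]
  let ips := entries.filterMap (fun e =>
    match (PySem.Dict.ofList e).get? "ip" with
    | some ip => if ip ≠ "" then some ip else none
    | none => none)
  pvGo ips

-- ===== PRECONDITION & SPEC =====
def Spec_detect_dos_attempts (entries : List (List (String × String))) (out : Int) : Prop := out = detect_dos_attempts_alt entries
instance (entries : List (List (String × String))) (out : Int) : Decidable (Spec_detect_dos_attempts entries out) := by unfold Spec_detect_dos_attempts; infer_instance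

-- ===== CLAIM (what is proved, stated in full; the proofs are below) =====
def Claim_equal_detect_dos_attempts : Prop := ∀ (entries : List (List (String × String))), Dom_detect_dos_attempts entries → Spec_detect_dos_attempts entries (detect_dos_attempts entries)

-- ===== LEMMAS AND PROOFS =====

/-- The ip a single entry contributes (nonempty value at key "ip"), if any. -/
def pvIpOf (entry : List (String × String)) : Option String :=
  ((PySem.Dict.ofList entry).get? "ip").bind (fun ip => if ip ≠ "" then some ip else none)

/-- A fold whose step fires exactly on `pvIpOf` hits is a fold over the extracted ips. -/
lemma pv_foldl_opt {σ : Type} (g : σ → String → σ) :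
    ∀ (es : List (List (String × String))) (init : σ),
      es.foldl (fun s e => (pvIpOf e).elim s (g s)) init
      = (es.filterMap pvIpOf).foldl g init := by
  intro es
  induction es with
  | nil => intro init; rfl
  | cons e es ih =>
    intro init
    cases h : pvIpOf e <;> simp [h, ih]

/-- A's loop body is the `pvIpOf` step. -/
lemma pv_step_eq {σ : Type} (g : σ → String → σ) (s : σ) (e : List (String × String)) :
    ((PySem.Dict.ofList e).get? "ip").elim s (fun ip => if ip ≠ "" then g s ip else s)
    = (pvIpOf e).elim s (g s) := by
  unfold pvIpOf
  cases h : (PySem.Dict.ofList e).get? "ip" with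
  | none => rfl
  | some ip => by_cases hip : ip = "" <;> simp [hip]

/-- Number of distinct ips seen more than 100 times in `l`. -/
def pvN (l : List String) : Nat :=
  (PySem.Set.ofList l).countP (fun k => decide (100 < l.count k))

/-- Prop-conditioned counting fold. -/
lemma pv_foldl_count {α : Type} (P : α → Prop) [DecidablePred P] :
    ∀ (l : List α) (a : Int),
      l.foldl (fun acc x => if P x then acc + 1 else acc) a
        = a + (l.countP (fun x => decide (P x)) : Int) := by
  intro l
  induction l with
  | nil => intro a; simp
  | cons x l ih =>
    intro a
    by_cases h : P x <;> simp [h, ih] <;> ring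

/-- A's second pass over the counter's items computes `pvN`. -/
lemma pv_A_scan (l : List String) :
    (PySem.Dict.counter l).items.foldl
        (fun dos p => if p.2 > 100 then dos + 1 else dos) (0 : Int)
      = (pvN l : Int) := by
  rw [pv_foldl_count (fun p : String × Int => p.2 > 100), PySem.Dict.items_counter,
      List.countP_map]
  have e : List.countP
        ((fun x : String × Int => decide (x.2 > 100)) ∘ fun k => (k, (l.count k : Int)))
        (PySem.Set.ofList l) = pvN l := by
    unfold pvN
    refine List.countP_congr fun k _ => ?_
    simp only [Function.comp_apply, decide_eq_true_eq, gt_iff_lt]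
    constructor <;> intro h <;> exact_mod_cast h
  simp [e]

/-- A computes `pvN` of the extracted ip list. -/
lemma pv_A_eq (entries : List (List (String × String))) :
    detect_dos_attempts entries = (pvN (entries.filterMap pvIpOf) : Int) := by
  unfold detect_dos_attempts
  rw [PySem.List.foldl_congr_mem entries _
        (fun (d : PySem.Dict String Int) e => (pvIpOf e).elim d
          (fun ip => d.modify ip 0 (· + 1))) PySem.Dict.empty
        (fun acc e _ => pv_step_eq (fun d ip => d.modify ip 0 (· + 1)) acc e),
      pv_foldl_opt, ← PySem.Dict.counter_eq_foldl, pv_A_scan]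

/-- Peeling off one value from `pvN`: the head contributes 1 iff its count exceeds 100,
    and the rest is `pvN` of the list with the head's occurrences removed. -/
lemma pvN_cons (x : String) (t : List String) :
    pvN (x :: t)
      = (if 100 < (x :: t).count x then 1 else 0) + pvN (t.filter (fun y => y ≠ x)) := by
  classical
  set t' := t.filter (fun y => y ≠ x) with ht'
  have hxt' : x ∉ t' := by
    intro h
    have := (List.mem_filter.mp h).2
    simp at this
  have hnd2 : (x :: PySem.Set.ofList t').Nodup :=
    List.nodup_cons.mpr ⟨by simpa [PySem.Set.mem_ofList] using hxt', PySem.Set.nodup_ofList _⟩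
  have hperm : (PySem.Set.ofList (x :: t)).Perm (x :: PySem.Set.ofList t') := by
    refine (List.perm_ext_iff_of_nodup (PySem.Set.nodup_ofList _) hnd2).mpr fun a => ?_
    simp only [PySem.Set.mem_ofList, List.mem_cons, ht', List.mem_filter, ne_eq,
      decide_eq_true_eq]
    by_cases ha : a = x <;> simp [ha] <;> tauto
  have hcnt : ∀ k ∈ PySem.Set.ofList t', (x :: t).count k = t'.count k := by
    intro k hk
    have hkx : k ≠ x := fun h => hxt' (h ▸ (by simpa [PySem.Set.mem_ofList] using hk))
    have h1 : (x :: t).count k = t.count k := by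
      simp [List.count_cons, Ne.symm hkx]
    have h2 : t'.count k = t.count k :=
      List.count_filter (by simpa using hkx)
    omega
  unfold pvN
  rw [hperm.countP_eq, List.countP_cons]
  have e : List.countP (fun k => decide (100 < (x :: t).count k)) (PySem.Set.ofList t')
      = List.countP (fun k => decide (100 < t'.count k)) (PySem.Set.ofList t') :=
    List.countP_congr (fun k hk => by rw [hcnt k hk])
  rw [e]
  simp only [decide_eq_true_eq]
  split_ifs with h <;> omega

/-- B's while loop computes `pvN`. -/
lemma pvGo_eq : ∀ (l : List String), pvGo l = (pvN l : Int) := by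
  intro l
  induction hn : l.length using Nat.strong_induction_on generalizing l with
  | _ n ih =>
    cases l with
    | nil => simp [pvGo, pvN, PySem.Set.ofList]
    | cons x t =>
      rw [pvGo]
      have hfil : (x :: t).filter (fun y => y ≠ x) = t.filter (fun y => y ≠ x) := by
        simp
      have hlen : (t.filter (fun y => y ≠ x)).length < n := by
        have h1 := List.length_filter_le (fun y => y ≠ x) t
        have h2 : t.length + 1 = n := by simpa using hn
        omega
      rw [hfil, ih _ hlen _ rfl, pvN_cons]
      split_ifs with h <;> push_cast <;> ring

/-- B computes `pvN` of the extracted ip list. -/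
lemma pv_B_eq (entries : List (List (String × String))) :
    detect_dos_attempts_alt entries = (pvN (entries.filterMap pvIpOf) : Int) := by
  unfold detect_dos_attempts_alt
  have hfm : (fun e => match (PySem.Dict.ofList e).get? "ip" with
      | some ip => if ip ≠ "" then some ip else none
      | none => none) = pvIpOf := by
    funext e
    unfold pvIpOf
    cases (PySem.Dict.ofList e).get? "ip" <;> rfl
  rw [hfm, pvGo_eq]

-- ===== VERDICT (by name: the statement is the Claim_ definition above) =====
theorem detect_dos_attempts_spec : Claim_equal_detect_dos_attempts := by
  intro entries _
  unfold Spec_detect_dos_attempts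
  rw [pv_A_eq, pv_B_eq]
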